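-- pv_equiv track=rewrite | github.com/NuAvalon/cairn-ai | src/cairn_ai/ingest.py | _summary_line
-- ===== SOURCE A (Python) =====
-- def _summary_line(entries: list[dict], filename: str, prefix: str) -> str:
--     """Build a summary line from entries."""
--     counts = {}
--     for tag_key in ("decision", "user-instruction", "commit", "file-write", "error"):
--         counts[tag_key] = sum(1 for e in entries if tag_key in e["tags"])
--     return (
--         f"{prefix} {len(entries)} entries from {filename}\n"
--         f"  Decisions: {counts['decision']}\n"
--         f"  User instructions: {counts['user-instruction']}\n"
--         f"  Commits: {counts['commit']}\n"
--         f"  File writes: {counts['file-write']}\n"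
--         f"  Errors: {counts['error']}"
--     )
-- ===== SOURCE B (Python) =====
-- def _summary_line(entries: list[dict], filename: str, prefix: str) -> str:
--     """Build a summary line from entries (single pass, five counters)."""
--     d = u = c = f = err = 0
--     for e in entries:
--         tags = e["tags"]
--         if "decision" in tags:
--             d += 1
--         if "user-instruction" in tags:
--             u += 1
--         if "commit" in tags:
--             c += 1
--         if "file-write" in tags:
--             f += 1
--         if "error" in tags:
--             err += 1
--     return (
--         f"{prefix} {len(entries)} entries from {filename}\n"
--         f"  Decisions: {d}\n"
--         f"  User instructions: {u}\n"
--         f"  Commits: {c}\n"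
--         f"  File writes: {f}\n"
--         f"  Errors: {err}"
--     )
-- ===== Notes on version B (the rewrite author's own statement) =====
-- stated objective: faster
-- what changed: A scans the entries list five times, once per fixed tag key, filling a dict; B makes one pass over entries maintaining five integer counters and builds the same string.
import Mathlib
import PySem

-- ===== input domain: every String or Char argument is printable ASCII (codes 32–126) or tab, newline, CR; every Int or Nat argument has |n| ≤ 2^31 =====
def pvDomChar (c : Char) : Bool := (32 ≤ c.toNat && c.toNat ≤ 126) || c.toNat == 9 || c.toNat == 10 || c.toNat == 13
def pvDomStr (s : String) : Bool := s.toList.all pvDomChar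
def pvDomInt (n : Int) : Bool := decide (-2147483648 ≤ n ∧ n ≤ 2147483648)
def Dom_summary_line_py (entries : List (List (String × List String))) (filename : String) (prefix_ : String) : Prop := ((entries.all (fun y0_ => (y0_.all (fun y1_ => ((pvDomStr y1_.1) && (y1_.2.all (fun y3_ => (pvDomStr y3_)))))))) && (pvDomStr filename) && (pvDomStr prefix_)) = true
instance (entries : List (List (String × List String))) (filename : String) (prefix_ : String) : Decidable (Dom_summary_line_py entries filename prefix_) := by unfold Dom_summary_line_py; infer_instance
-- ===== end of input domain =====

-- B changes the decomposition: A scans the entries list five times (once per tag key); B makes one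
-- pass maintaining five counters. Exact same output string; Pre_ excludes entries missing the
-- "tags" key, on which both Pythons raise KeyError.

-- ===== PORT A =====
-- e["tags"] : first-match lookup in the entry's association list (exact where the key is present;
-- Pre_ excludes the KeyError case, where Python raises and this helper returns []).
def pvTags (e : List (String × List String)) : List String :=
  ((e.find? (fun p => p.1 == "tags")).map Prod.snd).getD []

def summary_line_py (entries : List (List (String × List String))) (filename : String) (prefix_ : String) : String :=
  -- counts = {}; for tag_key in (...): counts[tag_key] = sum(1 for e in entries if tag_key in e["tags"])
  let counts : PySem.Dict String Int :=
    ["decision", "user-instruction", "commit", "file-write", "error"].foldl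
      (fun d tag_key =>
        d.insert tag_key
          (entries.foldl (fun acc e => if (pvTags e).contains tag_key then acc + 1 else acc) 0))
      PySem.Dict.empty
  prefix_ ++ " " ++ PySem.Int.toStr entries.length ++ " entries from " ++ filename ++
    "\n  Decisions: " ++ PySem.Int.toStr (counts.getD "decision" 0) ++
    "\n  User instructions: " ++ PySem.Int.toStr (counts.getD "user-instruction" 0) ++
    "\n  Commits: " ++ PySem.Int.toStr (counts.getD "commit" 0) ++
    "\n  File writes: " ++ PySem.Int.toStr (counts.getD "file-write" 0) ++
    "\n  Errors: " ++ PySem.Int.toStr (counts.getD "error" 0)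

-- ===== PORT B =====
def summary_line_py_alt (entries : List (List (String × List String))) (filename : String) (prefix_ : String) : String :=
  -- d = u = c = f = err = 0; single pass over entries incrementing the five counters
  let c : Int × Int × Int × Int × Int :=
    entries.foldl
      (fun c e =>
        let tags := pvTags e
        (c.1 + (if tags.contains "decision" then 1 else 0),
         c.2.1 + (if tags.contains "user-instruction" then 1 else 0),
         c.2.2.1 + (if tags.contains "commit" then 1 else 0),
         c.2.2.2.1 + (if tags.contains "file-write" then 1 else 0),
         c.2.2.2.2 + (if tags.contains "error" then 1 else 0)))
      (0, 0, 0, 0, 0)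
  prefix_ ++ " " ++ PySem.Int.toStr entries.length ++ " entries from " ++ filename ++
    "\n  Decisions: " ++ PySem.Int.toStr c.1 ++
    "\n  User instructions: " ++ PySem.Int.toStr c.2.1 ++
    "\n  Commits: " ++ PySem.Int.toStr c.2.2.1 ++
    "\n  File writes: " ++ PySem.Int.toStr c.2.2.2.1 ++
    "\n  Errors: " ++ PySem.Int.toStr c.2.2.2.2

-- ===== PRECONDITION & SPEC =====
-- Pre_ excludes entries with no "tags" key: there Python A (and Python B) raise KeyError.
def Pre_summary_line_py (entries : List (List (String × List String))) (filename : String) (prefix_ : String) : Prop :=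
  ∀ e ∈ entries, "tags" ∈ e.map Prod.fst
instance (entries : List (List (String × List String))) (filename : String) (prefix_ : String) : Decidable (Pre_summary_line_py entries filename prefix_) := by unfold Pre_summary_line_py; infer_instance
def pvWitness_summary_line_py : (List (List (String × List String))) × String × String :=
  ([[("tags", ["decision", "error"])], [("tags", [])]], "log.md", "SUMMARY:")

def Spec_summary_line_py (entries : List (List (String × List String))) (filename : String) (prefix_ : String) (out : String) : Prop := out = summary_line_py_alt entries filename prefix_
instance (entries : List (List (String × List String))) (filename : String) (prefix_ : String) (out : String) : Decidable (Spec_summary_line_py entries filename prefix_ out) := by unfold Spec_summary_line_py; infer_instance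

-- ===== CLAIM (what is proved, stated in full; the proofs are below) =====
def Claim_equal_summary_line_py : Prop := ∀ (entries : List (List (String × List String))) (filename : String) (prefix_ : String), Dom_summary_line_py entries filename prefix_ → Pre_summary_line_py entries filename prefix_ → Spec_summary_line_py entries filename prefix_ (summary_line_py entries filename prefix_)

-- ===== LEMMAS AND PROOFS =====

-- A's per-key count (the inner generator sum of port A), with the init generalised.
def pvCnt (k : String) (entries : List (List (String × List String))) : Int :=
  entries.foldl (fun acc e => if (pvTags e).contains k then acc + 1 else acc) 0

theorem pvCnt_shift (k : String) (entries : List (List (String × List String))) (n : Int) :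
    entries.foldl (fun acc e => if (pvTags e).contains k then acc + 1 else acc) n
      = n + pvCnt k entries := by
  induction entries generalizing n with
  | nil => simp [pvCnt]
  | cons e es ih =>
    simp only [pvCnt, List.foldl_cons]
    rw [ih, ih]
    split <;> ring

theorem pvCnt_cons (k : String) (e : List (String × List String)) (es : List (List (String × List String))) :
    pvCnt k (e :: es) = (if (pvTags e).contains k then 1 else 0) + pvCnt k es := by
  simp only [pvCnt, List.foldl_cons]
  rw [pvCnt_shift]
  split <;> simp [pvCnt]

theorem pvFold5 (entries : List (List (String × List String))) (c : Int × Int × Int × Int × Int) :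
    entries.foldl
      (fun c e =>
        let tags := pvTags e
        (c.1 + (if tags.contains "decision" then 1 else 0),
         c.2.1 + (if tags.contains "user-instruction" then 1 else 0),
         c.2.2.1 + (if tags.contains "commit" then 1 else 0),
         c.2.2.2.1 + (if tags.contains "file-write" then 1 else 0),
         c.2.2.2.2 + (if tags.contains "error" then 1 else 0))) c
      = (c.1 + pvCnt "decision" entries,
         c.2.1 + pvCnt "user-instruction" entries,
         c.2.2.1 + pvCnt "commit" entries,
         c.2.2.2.1 + pvCnt "file-write" entries,
         c.2.2.2.2 + pvCnt "error" entries) := by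
  induction entries generalizing c with
  | nil => simp [pvCnt]
  | cons e es ih =>
    simp only [List.foldl_cons, ih, pvCnt_cons, Prod.mk.injEq]
    refine ⟨by ring, by ring, by ring, by ring, by ring⟩

-- ===== VERDICT (by name: the statement is the Claim_ definition above) =====
theorem summary_line_py_spec : Claim_equal_summary_line_py := by
  intro entries filename prefix_ _ _
  unfold Spec_summary_line_py summary_line_py summary_line_py_alt
  simp only [List.foldl_cons, List.foldl_nil]
  rw [pvFold5]
  simp only [PySem.Dict.getD_insert, pvCnt,
    if_neg (show ¬("decision":String) = "error" by decide),
    if_neg (show ¬("decision":String) = "file-write" by decide),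
    if_neg (show ¬("decision":String) = "commit" by decide),
    if_neg (show ¬("decision":String) = "user-instruction" by decide),
    if_neg (show ¬("user-instruction":String) = "error" by decide),
    if_neg (show ¬("user-instruction":String) = "file-write" by decide),
    if_neg (show ¬("user-instruction":String) = "commit" by decide),
    if_neg (show ¬("commit":String) = "error" by decide),
    if_neg (show ¬("commit":String) = "file-write" by decide),
    if_neg (show ¬("file-write":String) = "error" by decide), if_true, zero_add]
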